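-- pv_equiv track=rewrite | github.com/dmiska25/log-viewer-backend | logviewer/logviewerapp/views.py | sortedZipLongest
-- ===== SOURCE A (Python) =====
-- def sortedZipLongest(l1, l2, key, fillvalue={}):
--     l1 = iter(sorted(l1, key=lambda x: x[key]))
--     l2 = iter(sorted(l2, key=lambda x: x[key]))
--     u = next(l1, None)
--     v = next(l2, None)
--
--     while (u is not None) or (v is not None):
--         if u is None:
--             yield fillvalue, v
--             v = next(l2, None)
--         elif v is None:
--             yield u, fillvalue
--             u = next(l1, None)
--         elif u.get(key) == v.get(key):
--             yield u, v
--             u = next(l1, None)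
--             v = next(l2, None)
--         elif u.get(key) < v.get(key):
--             yield u, fillvalue
--             u = next(l1, None)
--         else:
--             yield fillvalue, v
--             v = next(l2, None)
-- ===== SOURCE B (Python) =====
-- def sortedZipLongest(l1, l2, key, fillvalue={}):
--     g1 = {}
--     for d in l1:
--         g1.setdefault(d[key], []).append(d)
--     g2 = {}
--     for d in l2:
--         g2.setdefault(d[key], []).append(d)
--     for k in sorted(set(g1) | set(g2)):
--         a = g1.get(k, [])
--         b = g2.get(k, [])
--         for i in range(max(len(a), len(b))):
--             yield (a[i] if i < len(a) else fillvalue,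
--                    b[i] if i < len(b) else fillvalue)
-- ===== Notes on version B (the rewrite author's own statement) =====
-- stated objective: alternative
-- what changed: Replaces the sort-both-then-two-pointer merge with hash grouping: bucket each list by its key value with dict.setdefault, then iterate the sorted union of distinct key values and zip the two buckets index-wise, filling the shorter one.
import Mathlib
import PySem

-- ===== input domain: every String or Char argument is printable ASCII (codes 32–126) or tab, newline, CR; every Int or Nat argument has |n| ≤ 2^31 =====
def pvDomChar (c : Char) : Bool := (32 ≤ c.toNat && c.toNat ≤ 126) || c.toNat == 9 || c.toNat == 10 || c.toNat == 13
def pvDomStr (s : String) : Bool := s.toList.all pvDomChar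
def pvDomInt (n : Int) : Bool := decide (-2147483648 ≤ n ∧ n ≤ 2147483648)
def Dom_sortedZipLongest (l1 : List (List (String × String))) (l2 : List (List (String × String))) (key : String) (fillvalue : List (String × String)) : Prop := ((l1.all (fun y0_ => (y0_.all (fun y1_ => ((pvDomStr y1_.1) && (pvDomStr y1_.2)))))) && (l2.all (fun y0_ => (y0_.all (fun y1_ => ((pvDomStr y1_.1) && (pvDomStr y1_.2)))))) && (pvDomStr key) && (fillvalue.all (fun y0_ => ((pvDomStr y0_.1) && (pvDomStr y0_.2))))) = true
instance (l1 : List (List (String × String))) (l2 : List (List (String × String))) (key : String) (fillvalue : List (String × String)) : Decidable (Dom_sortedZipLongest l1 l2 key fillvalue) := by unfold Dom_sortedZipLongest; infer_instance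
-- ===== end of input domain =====

-- B replaces A's sort-both-then-two-pointer merge by hash grouping (setdefault buckets per key
-- value, then the sorted union of distinct keys with index-wise zip-and-fill of the two buckets);
-- equivalence of the return values is proved on inputs where every dict contains `key`.

-- ===== PORT A =====
-- d[key] / d.get(key): under Pre_ the key is present, so getD "" is exact
def pvKeyOf (key : String) (d : List (String × String)) : String :=
  (PySem.Dict.ofList d).getD key ""

-- the while-loop over the two iterators; u/v are the list heads, next() = tail
def pvMerge (key : String) (fillvalue : List (String × String)) :
    List (List (String × String)) → List (List (String × String)) →
    List ((List (String × String)) × (List (String × String)))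
  | [], [] => []
  | [], v :: r2 => (fillvalue, v) :: pvMerge key fillvalue [] r2
  | u :: r1, [] => (u, fillvalue) :: pvMerge key fillvalue r1 []
  | u :: r1, v :: r2 =>
    if pvKeyOf key u == pvKeyOf key v then (u, v) :: pvMerge key fillvalue r1 r2
    else if pvKeyOf key u < pvKeyOf key v then (u, fillvalue) :: pvMerge key fillvalue r1 (v :: r2)
    else (fillvalue, v) :: pvMerge key fillvalue (u :: r1) r2
  termination_by s1 s2 => s1.length + s2.length

def sortedZipLongest (l1 : List (List (String × String))) (l2 : List (List (String × String))) (key : String) (fillvalue : List (String × String)) : List ((List (String × String)) × (List (String × String))) :=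
  pvMerge key fillvalue (PySem.List.sorted l1 (pvKeyOf key) false) (PySem.List.sorted l2 (pvKeyOf key) false)

-- ===== PORT B =====
-- g.setdefault(d[key], []).append(d)  =  modify (d[key]) [] (· ++ [d])
def pvGroups (key : String) (l : List (List (String × String))) :
    PySem.Dict String (List (List (String × String))) :=
  l.foldl (fun g d => g.modify (pvKeyOf key d) [] (· ++ [d])) PySem.Dict.empty

def sortedZipLongest_alt (l1 : List (List (String × String))) (l2 : List (List (String × String))) (key : String) (fillvalue : List (String × String)) : List ((List (String × String)) × (List (String × String))) :=
  let g1 := pvGroups key l1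
  let g2 := pvGroups key l2
  let ks := PySem.List.sorted
    (PySem.Set.union (PySem.Set.ofList g1.keys) (PySem.Set.ofList g2.keys)) (fun x => x) false
  ks.flatMap (fun k =>
    let a := g1.getD k []
    let b := g2.getD k []
    (List.range (max a.length b.length)).map (fun i => (a.getD i fillvalue, b.getD i fillvalue)))

-- ===== PRECONDITION & SPEC =====
-- Pre_ excludes exactly the inputs where some dict lacks `key`: there Python A raises KeyError
-- (in sorted(..., key=lambda x: x[key]) when the generator is consumed), and Python B raises too.
def Pre_sortedZipLongest (l1 : List (List (String × String))) (l2 : List (List (String × String))) (key : String) (fillvalue : List (String × String)) : Prop :=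
  ((l1.all (fun d => (PySem.Dict.ofList d).contains key)) &&
   (l2.all (fun d => (PySem.Dict.ofList d).contains key))) = true
instance (l1 : List (List (String × String))) (l2 : List (List (String × String))) (key : String) (fillvalue : List (String × String)) : Decidable (Pre_sortedZipLongest l1 l2 key fillvalue) := by unfold Pre_sortedZipLongest; infer_instance

def pvWitness_sortedZipLongest : (List (List (String × String))) × (List (List (String × String))) × String × (List (String × String)) :=
  ([[("k", "b")], [("k", "a")]], [[("k", "a"), ("z", "1")]], "k", [])

def Spec_sortedZipLongest (l1 : List (List (String × String))) (l2 : List (List (String × String))) (key : String) (fillvalue : List (String × String)) (out : List ((List (String × String)) × (List (String × String)))) : Prop := out = sortedZipLongest_alt l1 l2 key fillvalue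
instance (l1 : List (List (String × String))) (l2 : List (List (String × String))) (key : String) (fillvalue : List (String × String)) (out : List ((List (String × String)) × (List (String × String)))) : Decidable (Spec_sortedZipLongest l1 l2 key fillvalue out) := by unfold Spec_sortedZipLongest; infer_instance

-- ===== CLAIM (what is proved, stated in full; the proofs are below) =====
def Claim_equal_sortedZipLongest : Prop := ∀ (l1 : List (List (String × String))) (l2 : List (List (String × String))) (key : String) (fillvalue : List (String × String)), Dom_sortedZipLongest l1 l2 key fillvalue → Pre_sortedZipLongest l1 l2 key fillvalue → Spec_sortedZipLongest l1 l2 key fillvalue (sortedZipLongest l1 l2 key fillvalue)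

-- ===== LEMMAS AND PROOFS =====

-- proof-side recursive form of the index-wise zip-and-fill
def pvZip (f : List (String × String)) :
    List (List (String × String)) → List (List (String × String)) →
    List ((List (String × String)) × (List (String × String)))
  | [], [] => []
  | [], y :: b => (f, y) :: pvZip f [] b
  | x :: a, [] => (x, f) :: pvZip f a []
  | x :: a, y :: b => (x, y) :: pvZip f a b
  termination_by a b => a.length + b.length

-- canonical grouped form over arbitrary lists
def pvCanon (key : String) (f : List (String × String))
    (s1 s2 : List (List (String × String))) :
    List ((List (String × String)) × (List (String × String))) :=
  (PySem.List.sorted (PySem.Set.ofList (s1.map (pvKeyOf key) ++ s2.map (pvKeyOf key)))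
      (fun x => x) false).flatMap
    (fun c => pvZip f (s1.filter (fun d => pvKeyOf key d == c))
                      (s2.filter (fun d => pvKeyOf key d == c)))

lemma pvZip_eq_range (f : List (String × String)) (a b : List (List (String × String))) :
    (List.range (max a.length b.length)).map (fun i => (a.getD i f, b.getD i f)) = pvZip f a b := by
  induction a generalizing b with
  | nil =>
    induction b with
    | nil => simp [pvZip]
    | cons y b ih =>
      simp only [List.length_nil, List.length_cons, Nat.max_eq_right (Nat.zero_le _)] at *
      rw [List.range_succ_eq_map]
      simp only [List.map_cons, List.map_map, pvZip]
      refine congrArg₂ _ rfl ?_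
      simpa using ih
  | cons x a ih =>
    cases b with
    | nil =>
      have h := ih []
      simp only [List.length_cons, List.length_nil, Nat.max_eq_left (Nat.zero_le _)] at *
      rw [List.range_succ_eq_map]
      simp only [List.map_cons, List.map_map, pvZip]
      refine congrArg₂ _ rfl ?_
      simpa using h
    | cons y b =>
      have h := ih b
      simp only [List.length_cons, Nat.succ_max_succ] at *
      rw [List.range_succ_eq_map]
      simp only [List.map_cons, List.map_map, pvZip]
      refine congrArg₂ _ rfl ?_
      simpa using h

lemma pvInsertBy_pairwise {α : Type} (kf : α → String) (x : α) (ys : List α)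
    (h : ys.Pairwise (fun a b => kf a ≤ kf b)) :
    (PySem.List.insertBy (fun a b => decide (kf a < kf b)) x ys).Pairwise
      (fun a b => kf a ≤ kf b) := by
  induction ys with
  | nil => simp [PySem.List.insertBy]
  | cons y ys ih =>
    rcases List.pairwise_cons.mp h with ⟨hy, hys⟩
    by_cases hlt : kf x < kf y
    · simp only [PySem.List.insertBy, hlt, decide_true, if_pos rfl]
      refine List.pairwise_cons.mpr ⟨?_, h⟩
      intro b hb
      rcases List.mem_cons.mp hb with rfl | hb
      · exact le_of_lt hlt
      · exact le_trans (le_of_lt hlt) (hy b hb)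
    · simp only [PySem.List.insertBy, hlt, decide_false, Bool.false_eq_true, if_false]
      refine List.pairwise_cons.mpr ⟨?_, ih hys⟩
      intro b hb
      rcases (PySem.List.mem_insertBy _ _ _ _).mp hb with rfl | hb
      · exact le_of_not_gt hlt
      · exact hy b hb

lemma pvFilter_insertBy {α : Type} (kf : α → String) (c : String) (x : α) (ys : List α)
    (h : ys.Pairwise (fun a b => kf a ≤ kf b)) :
    (PySem.List.insertBy (fun a b => decide (kf a < kf b)) x ys).filter (fun d => kf d == c)
      = ys.filter (fun d => kf d == c) ++ (if kf x == c then [x] else []) := by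
  induction ys with
  | nil =>
    simp only [PySem.List.insertBy, List.filter_cons, List.filter_nil, List.nil_append]
  | cons y ys ih =>
    rcases List.pairwise_cons.mp h with ⟨hy, hys⟩
    by_cases hlt : kf x < kf y
    · simp only [PySem.List.insertBy, hlt, decide_true, if_pos rfl]
      by_cases hxc : kf x == c
      · have hxc' : kf x = c := by simpa using hxc
        have hnil : (y :: ys).filter (fun d => kf d == c) = [] := by
          rw [List.filter_eq_nil_iff]
          intro a ha
          have : kf y ≤ kf a := by
            rcases List.mem_cons.mp ha with rfl | ha
            · exact le_refl _
            · exact hy a ha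
          have : c < kf a := lt_of_lt_of_le (hxc' ▸ hlt) this
          simp [beq_iff_eq]
          exact fun hh => absurd hh.symm (ne_of_lt this)
        simp only [List.filter_cons, hxc, if_pos, hnil]
        simp [hxc]
      · simp [List.filter_cons, hxc]
    · simp only [PySem.List.insertBy, hlt, decide_false, Bool.false_eq_true, if_false]
      rw [List.filter_cons, List.filter_cons, ih hys]
      split <;> simp
lemma pvFilter_sorted {α : Type} (kf : α → String) (c : String) (l : List α) :
    (PySem.List.sorted l kf false).filter (fun d => kf d == c)
      = l.filter (fun d => kf d == c) := by
  rw [PySem.List.sorted_eq_foldl_insertBy]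
  suffices H : ∀ (acc : List α), acc.Pairwise (fun a b => kf a ≤ kf b) →
      (l.foldl (fun acc x => PySem.List.insertBy (fun a b => decide (kf a < kf b)) x acc) acc).filter
        (fun d => kf d == c) = acc.filter (fun d => kf d == c) ++ l.filter (fun d => kf d == c) by
    simpa using H [] (by simp)
  induction l with
  | nil => intro acc _; simp
  | cons x l ih =>
    intro acc hacc
    have hins : (PySem.List.insertBy (fun a b => decide (kf a < kf b)) x acc).Pairwise
        (fun a b => kf a ≤ kf b) := by
      exact pvInsertBy_pairwise kf x acc hacc
    simp only [List.foldl_cons]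
    rw [ih _ hins, pvFilter_insertBy kf c x acc hacc, List.filter_cons]
    split <;> simp

lemma pvSorted_nodup_ext (xs ys : List String) (hx : xs.Nodup) (hy : ys.Nodup)
    (h : ∀ a, a ∈ xs ↔ a ∈ ys) :
    PySem.List.sorted xs (fun x => x) false = PySem.List.sorted ys (fun x => x) false := by
  apply PySem.List.sorted_eq_of_perm_of_pairwise_lt
  · -- (sorted ys).Perm xs
    refine List.Perm.trans (PySem.List.sorted_perm ys (fun x => x) false) ?_
    exact (List.perm_ext_iff_of_nodup hy hx).mpr (fun a => (h a).symm)
  · have hp := PySem.List.sorted_pairwise ys (fun x => x)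
    have hn : (PySem.List.sorted ys (fun x => x) false).Nodup :=
      ((PySem.List.sorted_perm ys (fun x => x) false).nodup_iff).mpr hy
    have := List.Pairwise.and hp hn
    exact this.imp (fun {a b} hab => lt_of_le_of_ne hab.1 hab.2)

lemma pvKeys_min_cons (xs : List String) (c : String) (hc : c ∈ xs) (h : ∀ y ∈ xs, c ≤ y) :
    PySem.List.sorted (PySem.Set.ofList xs) (fun x => x) false
      = c :: PySem.List.sorted (PySem.Set.ofList (xs.filter (fun y => y != c))) (fun x => x) false := by
  apply PySem.List.sorted_eq_of_perm_of_pairwise_lt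
  · -- Perm to ofList xs
    have hmem : ∀ a, a ∈ c :: PySem.List.sorted (PySem.Set.ofList (xs.filter (fun y => y != c))) (fun x => x) false ↔ a ∈ PySem.Set.ofList xs := by
      intro a
      simp only [List.mem_cons, PySem.List.mem_sorted, PySem.Set.mem_ofList, List.mem_filter,
        bne_iff_ne, ne_eq]
      constructor
      · rintro (rfl | ⟨ha, _⟩) <;> assumption
      · intro ha
        by_cases hac : a = c
        · exact Or.inl hac
        · exact Or.inr ⟨ha, hac⟩
    have hn1 : (c :: PySem.List.sorted (PySem.Set.ofList (xs.filter (fun y => y != c))) (fun x => x) false).Nodup := by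
      refine List.nodup_cons.mpr ⟨?_, ?_⟩
      · simp only [PySem.List.mem_sorted, PySem.Set.mem_ofList, List.mem_filter, bne_iff_ne, ne_eq]
        simp
      · exact ((PySem.List.sorted_perm _ (fun x => x) false).nodup_iff).mpr (PySem.Set.nodup_ofList _)
    exact (List.perm_ext_iff_of_nodup hn1 (PySem.Set.nodup_ofList xs)).mpr hmem
  · refine List.pairwise_cons.mpr ⟨?_, ?_⟩
    · intro b hb
      simp only [PySem.List.mem_sorted, PySem.Set.mem_ofList, List.mem_filter, bne_iff_ne, ne_eq] at hb
      exact lt_of_le_of_ne (h b hb.1) (Ne.symm hb.2)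
    · exact PySem.List.sorted_ofList_pairwise_lt _

lemma pvGroups_getD (key : String) (l : List (List (String × String))) (c : String) :
    (pvGroups key l).getD c [] = l.filter (fun d => pvKeyOf key d == c) := by
  have h1 : pvGroups key l
      = (l.map (fun d => (pvKeyOf key d, d))).foldl
          (fun g p => g.modify p.1 [] (· ++ [p.2])) PySem.Dict.empty := by
    rw [List.foldl_map]; rfl
  rw [h1, PySem.Dict.getD_foldl_modify_append]
  simp [PySem.Dict.getD_empty, List.filter_map, Function.comp_def]

lemma pvGroups_keys_mem (key : String) (l : List (List (String × String))) (a : String) :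
    a ∈ (pvGroups key l).keys ↔ a ∈ l.map (pvKeyOf key) := by
  unfold pvGroups
  rw [PySem.Dict.keys_foldl_modify_key l (pvKeyOf key) [] (fun _ d v => v ++ [d])]
  rw [PySem.Set.mem_update]
  simp [PySem.Dict.keys_empty]

-- filter by ==c absorbs a previous filter by !=m when c ≠ m
lemma pvFilter_ne_filter_eq (key : String) (m c : String) (hcm : c ≠ m)
    (s : List (List (String × String))) :
    (s.filter (fun d => pvKeyOf key d != m)).filter (fun d => pvKeyOf key d == c)
      = s.filter (fun d => pvKeyOf key d == c) := by
  rw [List.filter_filter]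
  apply List.filter_congr
  intro d _
  by_cases hdc : pvKeyOf key d = c
  · simp [hdc, hcm]
  · simp [hdc]

lemma pvCanon_split (key : String) (f : List (String × String)) (m : String)
    (s1 s2 : List (List (String × String)))
    (hmin : ∀ d ∈ s1 ++ s2, m ≤ pvKeyOf key d) :
    pvCanon key f s1 s2
      = pvZip f (s1.filter (fun d => pvKeyOf key d == m)) (s2.filter (fun d => pvKeyOf key d == m))
        ++ pvCanon key f (s1.filter (fun d => pvKeyOf key d != m))
                         (s2.filter (fun d => pvKeyOf key d != m)) := by
  have hkeys1 : (s1.filter (fun d => pvKeyOf key d != m)).map (pvKeyOf key)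
      = (s1.map (pvKeyOf key)).filter (fun y => y != m) := by
    rw [List.filter_map]; rfl
  have hkeys2 : (s2.filter (fun d => pvKeyOf key d != m)).map (pvKeyOf key)
      = (s2.map (pvKeyOf key)).filter (fun y => y != m) := by
    rw [List.filter_map]; rfl
  by_cases hm : m ∈ s1.map (pvKeyOf key) ++ s2.map (pvKeyOf key)
  · -- peel m off the sorted key set
    have hmin' : ∀ y ∈ s1.map (pvKeyOf key) ++ s2.map (pvKeyOf key), m ≤ y := by
      intro y hy
      simp only [List.mem_append, List.mem_map] at hy
      rcases hy with ⟨d, hd, rfl⟩ | ⟨d, hd, rfl⟩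
      · exact hmin d (List.mem_append.mpr (Or.inl hd))
      · exact hmin d (List.mem_append.mpr (Or.inr hd))
    rw [pvCanon, pvKeys_min_cons _ m hm hmin', List.flatMap_cons]
    congr 1
    rw [pvCanon, hkeys1, hkeys2, ← List.filter_append]
    apply List.flatMap_congr
    intro c hcmem
    have hc : c ≠ m := by
      simp only [PySem.List.mem_sorted, PySem.Set.mem_ofList, List.mem_filter, bne_iff_ne, ne_eq] at hcmem
      exact hcmem.2
    rw [pvFilter_ne_filter_eq key m c hc, pvFilter_ne_filter_eq key m c hc]
  · -- m absent: the ==m chunk is empty and the filters are the identity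
    have h1 : s1.filter (fun d => pvKeyOf key d == m) = [] := by
      rw [List.filter_eq_nil_iff]
      intro d hd hdm
      exact hm (List.mem_append.mpr (Or.inl (List.mem_map.mpr ⟨d, hd, by simpa using hdm⟩)))
    have h2 : s2.filter (fun d => pvKeyOf key d == m) = [] := by
      rw [List.filter_eq_nil_iff]
      intro d hd hdm
      exact hm (List.mem_append.mpr (Or.inr (List.mem_map.mpr ⟨d, hd, by simpa using hdm⟩)))
    have h1' : s1.filter (fun d => pvKeyOf key d != m) = s1 := by
      rw [List.filter_eq_self]
      intro d hd
      simp only [bne_iff_ne, ne_eq]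
      intro hdm
      exact hm (List.mem_append.mpr (Or.inl (List.mem_map.mpr ⟨d, hd, hdm⟩)))
    have h2' : s2.filter (fun d => pvKeyOf key d != m) = s2 := by
      rw [List.filter_eq_self]
      intro d hd
      simp only [bne_iff_ne, ne_eq]
      intro hdm
      exact hm (List.mem_append.mpr (Or.inr (List.mem_map.mpr ⟨d, hd, hdm⟩)))
    rw [h1, h2, h1', h2']
    simp [pvZip]

lemma pvFilter_head_ne (key m : String) (v : List (String × String))
    (r2 : List (List (String × String)))
    (h2 : (v :: r2).Pairwise (fun a b => pvKeyOf key a ≤ pvKeyOf key b))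
    (hmin : ∀ d ∈ v :: r2, m ≤ pvKeyOf key d) (hv : pvKeyOf key v ≠ m) :
    (v :: r2).filter (fun d => pvKeyOf key d == m) = []
    ∧ (v :: r2).filter (fun d => pvKeyOf key d != m) = v :: r2 := by
  have hall : ∀ d ∈ v :: r2, pvKeyOf key d ≠ m := by
    intro d hd
    have hvm : m < pvKeyOf key v := lt_of_le_of_ne (hmin v (by simp)) (Ne.symm hv)
    have hvd : pvKeyOf key v ≤ pvKeyOf key d := by
      rcases List.mem_cons.mp hd with rfl | hd
      · exact le_refl _
      · exact (List.pairwise_cons.mp h2).1 d hd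
    exact Ne.symm (ne_of_lt (lt_of_lt_of_le hvm hvd))
  constructor
  · rw [List.filter_eq_nil_iff]
    intro d hd
    simp [hall d hd]
  · rw [List.filter_eq_self]
    intro d hd
    simp [hall d hd]

lemma pvMerge_split (key : String) (f : List (String × String)) (m : String)
    (s1 s2 : List (List (String × String)))
    (h1 : s1.Pairwise (fun a b => pvKeyOf key a ≤ pvKeyOf key b))
    (h2 : s2.Pairwise (fun a b => pvKeyOf key a ≤ pvKeyOf key b))
    (hmin : ∀ d ∈ s1 ++ s2, m ≤ pvKeyOf key d) :
    pvMerge key f s1 s2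
      = pvZip f (s1.filter (fun d => pvKeyOf key d == m)) (s2.filter (fun d => pvKeyOf key d == m))
        ++ pvMerge key f (s1.filter (fun d => pvKeyOf key d != m))
                         (s2.filter (fun d => pvKeyOf key d != m)) := by
  suffices H : ∀ n (s1 s2 : List (List (String × String))), s1.length + s2.length = n →
      s1.Pairwise (fun a b => pvKeyOf key a ≤ pvKeyOf key b) →
      s2.Pairwise (fun a b => pvKeyOf key a ≤ pvKeyOf key b) →
      (∀ d ∈ s1 ++ s2, m ≤ pvKeyOf key d) →
      pvMerge key f s1 s2
      = pvZip f (s1.filter (fun d => pvKeyOf key d == m)) (s2.filter (fun d => pvKeyOf key d == m))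
        ++ pvMerge key f (s1.filter (fun d => pvKeyOf key d != m))
                         (s2.filter (fun d => pvKeyOf key d != m)) by
    exact H _ s1 s2 rfl h1 h2 hmin
  intro n
  induction n using Nat.strong_induction_on with
  | _ n IH =>
    intro s1 s2 hn h1 h2 hmin
    match s1, s2 with
    | [], [] => simp [pvMerge, pvZip]
    | [], v :: r2 =>
      by_cases hv : pvKeyOf key v = m
      · have e1 : (v :: r2).filter (fun d => pvKeyOf key d == m)
            = v :: r2.filter (fun d => pvKeyOf key d == m) := by simp [List.filter_cons, hv]
        have e2 : (v :: r2).filter (fun d => pvKeyOf key d != m)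
            = r2.filter (fun d => pvKeyOf key d != m) := by simp [List.filter_cons, hv]
        rw [e1, e2]
        have hrec := IH (r2.length) (by simp at hn; omega) [] r2 (by simp) (by simp)
          (List.pairwise_cons.mp h2).2
          (by intro d hd; exact hmin d (by simp at hd ⊢; tauto))
        simp only [List.filter_nil] at hrec
        simp only [pvMerge, pvZip, List.filter_nil]
        rw [hrec]
        rfl
      · rcases pvFilter_head_ne key m v r2 h2 (by intro d hd; exact hmin d (by simp at hd ⊢; tauto)) hv with ⟨e1, e2⟩
        simp [e1, e2, pvZip]
    | u :: r1, s2 =>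
      by_cases hu : pvKeyOf key u = m
      · have e1 : (u :: r1).filter (fun d => pvKeyOf key d == m)
            = u :: r1.filter (fun d => pvKeyOf key d == m) := by simp [List.filter_cons, hu]
        have e2 : (u :: r1).filter (fun d => pvKeyOf key d != m)
            = r1.filter (fun d => pvKeyOf key d != m) := by simp [List.filter_cons, hu]
        match s2 with
        | [] =>
          have hrec := IH (r1.length) (by simp at hn; omega) r1 [] rfl
            (List.pairwise_cons.mp h1).2 (by simp)
            (by intro d hd; exact hmin d (by simp at hd ⊢; tauto))
          simp only [List.filter_nil] at hrec
          rw [e1, e2]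
          simp only [pvMerge, pvZip, List.filter_nil]
          rw [hrec]
          rfl
        | v :: r2 =>
          by_cases hv : pvKeyOf key v = m
          · have f1 : (v :: r2).filter (fun d => pvKeyOf key d == m)
                = v :: r2.filter (fun d => pvKeyOf key d == m) := by simp [List.filter_cons, hv]
            have f2 : (v :: r2).filter (fun d => pvKeyOf key d != m)
                = r2.filter (fun d => pvKeyOf key d != m) := by simp [List.filter_cons, hv]
            have heq : (pvKeyOf key u == pvKeyOf key v) = true := by simp [hu, hv]
            have hrec := IH (r1.length + r2.length) (by simp at hn; omega) r1 r2 rfl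
              (List.pairwise_cons.mp h1).2 (List.pairwise_cons.mp h2).2
              (by intro d hd; exact hmin d (by simp at hd ⊢; tauto))
            rw [e1, e2, f1, f2]
            simp only [pvMerge, heq, if_pos rfl, pvZip]
            rw [hrec]
            rfl
          · rcases pvFilter_head_ne key m v r2 h2 (by intro d hd; exact hmin d (by simp at hd ⊢; tauto)) hv with ⟨f1, f2⟩
            have hne : (pvKeyOf key u == pvKeyOf key v) = false := by
              rw [beq_eq_false_iff_ne]; intro hc; exact hv (by rw [← hc, hu])
            have hlt : pvKeyOf key u < pvKeyOf key v := by
              refine lt_of_le_of_ne ?_ ?_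
              · rw [hu]; exact hmin v (by simp)
              · rw [hu]; exact fun hc => hv hc.symm
            have hrec := IH (r1.length + (v :: r2).length) (by simp at hn ⊢; omega) r1 (v :: r2) rfl
              (List.pairwise_cons.mp h1).2 h2
              (by intro d hd; exact hmin d (by simp at hd ⊢; tauto))
            rw [f1, f2] at hrec
            rw [e1, e2, f1, f2]
            simp only [pvMerge, hne, Bool.false_eq_true, if_false, decide_eq_true_eq, hlt, if_pos, pvZip]
            rw [hrec]
            rfl
      · -- head of s1 not at the minimum key
        have hmin1 : ∀ d ∈ u :: r1, m ≤ pvKeyOf key d := by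
          intro d hd; exact hmin d (by simp at hd ⊢; tauto)
        rcases pvFilter_head_ne key m u r1 h1 hmin1 hu with ⟨e1, e2⟩
        match s2 with
        | [] => simp [e1, e2, pvZip]
        | v :: r2 =>
          by_cases hv : pvKeyOf key v = m
          · have f1 : (v :: r2).filter (fun d => pvKeyOf key d == m)
                = v :: r2.filter (fun d => pvKeyOf key d == m) := by simp [List.filter_cons, hv]
            have f2 : (v :: r2).filter (fun d => pvKeyOf key d != m)
                = r2.filter (fun d => pvKeyOf key d != m) := by simp [List.filter_cons, hv]
            have hne : (pvKeyOf key u == pvKeyOf key v) = false := by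
              rw [beq_eq_false_iff_ne]; intro hc; exact hu (hc.trans hv)
            have hnlt : ¬ (pvKeyOf key u < pvKeyOf key v) := by
              rw [hv]
              exact not_lt_of_ge (hmin u (by simp))
            have hrec := IH ((u :: r1).length + r2.length) (by simp at hn ⊢; omega) (u :: r1) r2 rfl
              h1 (List.pairwise_cons.mp h2).2
              (by intro d hd; exact hmin d (by simp at hd ⊢; tauto))
            rw [e1, e2] at hrec
            rw [e1, e2, f1, f2]
            simp only [pvMerge, hne, Bool.false_eq_true, if_false, decide_eq_true_eq, hnlt, pvZip]
            rw [hrec]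
            rfl
          · rcases pvFilter_head_ne key m v r2 h2 (by intro d hd; exact hmin d (by simp at hd ⊢; tauto)) hv with ⟨f1, f2⟩
            simp [e1, e2, f1, f2, pvZip]

lemma pvMerge_eq_canon (key : String) (f : List (String × String))
    (s1 s2 : List (List (String × String)))
    (h1 : s1.Pairwise (fun a b => pvKeyOf key a ≤ pvKeyOf key b))
    (h2 : s2.Pairwise (fun a b => pvKeyOf key a ≤ pvKeyOf key b)) :
    pvMerge key f s1 s2 = pvCanon key f s1 s2 := by
  suffices H : ∀ n (s1 s2 : List (List (String × String))), s1.length + s2.length = n →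
      s1.Pairwise (fun a b => pvKeyOf key a ≤ pvKeyOf key b) →
      s2.Pairwise (fun a b => pvKeyOf key a ≤ pvKeyOf key b) →
      pvMerge key f s1 s2 = pvCanon key f s1 s2 by
    exact H _ s1 s2 rfl h1 h2
  intro n
  induction n using Nat.strong_induction_on with
  | _ n IH =>
    intro s1 s2 hn h1 h2
    have step : ∀ m : String, (∀ d ∈ s1 ++ s2, m ≤ pvKeyOf key d) →
        ((∃ d ∈ s1, pvKeyOf key d = m) ∨ (∃ d ∈ s2, pvKeyOf key d = m)) →
        pvMerge key f s1 s2 = pvCanon key f s1 s2 := by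
      intro m hmin hmem
      rw [pvMerge_split key f m s1 s2 h1 h2 hmin, pvCanon_split key f m s1 s2 hmin]
      congr 1
      have hle1 := List.length_filter_le (fun d => pvKeyOf key d != m) s1
      have hle2 := List.length_filter_le (fun d => pvKeyOf key d != m) s2
      have hlen : (s1.filter (fun d => pvKeyOf key d != m)).length
          + (s2.filter (fun d => pvKeyOf key d != m)).length < n := by
        rcases hmem with ⟨d, hd, hdm⟩ | ⟨d, hd, hdm⟩
        · have hlt : (s1.filter (fun d => pvKeyOf key d != m)).length < s1.length :=
            List.length_filter_lt_length_iff_exists.mpr ⟨d, hd, by simp [hdm]⟩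
          omega
        · have hlt : (s2.filter (fun d => pvKeyOf key d != m)).length < s2.length :=
            List.length_filter_lt_length_iff_exists.mpr ⟨d, hd, by simp [hdm]⟩
          omega
      exact IH _ hlen _ _ rfl (h1.filter _) (h2.filter _)
    rcases s1 with _ | ⟨u, r1⟩ <;> rcases s2 with _ | ⟨v, r2⟩
    · simp [pvMerge]; rfl
    · refine step (pvKeyOf key v) ?_ (Or.inr ⟨v, by simp⟩)
      intro d hd
      simp only [List.nil_append, List.mem_cons] at hd
      rcases hd with rfl | hd
      · exact le_refl _
      · exact (List.pairwise_cons.mp h2).1 d hd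
    · refine step (pvKeyOf key u) ?_ (Or.inl ⟨u, by simp⟩)
      intro d hd
      simp only [List.append_nil, List.mem_cons] at hd
      rcases hd with rfl | hd
      · exact le_refl _
      · exact (List.pairwise_cons.mp h1).1 d hd
    · by_cases huv : pvKeyOf key u ≤ pvKeyOf key v
      · refine step (min (pvKeyOf key u) (pvKeyOf key v)) ?_
          (Or.inl ⟨u, by simp, (min_eq_left huv).symm⟩)
        intro d hd
        simp only [List.mem_append, List.mem_cons] at hd
        rcases hd with (rfl | hd) | (rfl | hd)
        · exact min_le_left _ _
        · exact le_trans (min_le_left _ _) ((List.pairwise_cons.mp h1).1 d hd)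
        · exact min_le_right _ _
        · exact le_trans (min_le_right _ _) ((List.pairwise_cons.mp h2).1 d hd)
      · refine step (min (pvKeyOf key u) (pvKeyOf key v)) ?_
          (Or.inr ⟨v, by simp, (min_eq_right (le_of_not_ge huv)).symm⟩)
        intro d hd
        simp only [List.mem_append, List.mem_cons] at hd
        rcases hd with (rfl | hd) | (rfl | hd)
        · exact min_le_left _ _
        · exact le_trans (min_le_left _ _) ((List.pairwise_cons.mp h1).1 d hd)
        · exact min_le_right _ _
        · exact le_trans (min_le_right _ _) ((List.pairwise_cons.mp h2).1 d hd)

-- ===== glue =====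
theorem sortedZipLongest_spec : Claim_equal_sortedZipLongest := by
  intro l1 l2 key fillvalue _ _
  unfold Spec_sortedZipLongest sortedZipLongest sortedZipLongest_alt
  rw [pvMerge_eq_canon key fillvalue _ _
        (PySem.List.sorted_pairwise l1 (pvKeyOf key))
        (PySem.List.sorted_pairwise l2 (pvKeyOf key))]
  unfold pvCanon
  simp only [pvFilter_sorted, pvGroups_getD, pvZip_eq_range]
  congr 1
  apply pvSorted_nodup_ext
  · exact PySem.Set.nodup_ofList _
  · exact PySem.Set.nodup_union _ _ (PySem.Set.nodup_ofList _)
  · intro a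
    simp only [PySem.Set.mem_ofList, PySem.Set.mem_union, List.mem_append, List.mem_map,
      PySem.List.mem_sorted, pvGroups_keys_mem, List.mem_map]
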